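-- pv_equiv track=rewrite | github.com/jelmr/advent-of-code | year_2015/day_08/part2.py | solve
-- ===== SOURCE A (Python) =====
-- from typing import List
--
-- def solve(input_text: List[str]) -> str | int:
--     def count(word: str) -> int:
--         count = 0
--
--         for c in word:
--             if c in '\\"':
--                 count += 1
--             elif c == "'":
--                 count += 2
--             count += 1
--
--         return count - len(word) + 2  # + 2 for the "
--
--     return sum(map(count, input_text))
-- ===== SOURCE B (Python) =====
-- from typing import List
--
-- def solve(input_text: List[str]) -> str | int:
--     return sum(2 + w.count('\\') + w.count('"') + 2 * w.count("'") for w in input_text)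
-- ===== Notes on version B (the rewrite author's own statement) =====
-- stated objective: simpler
-- what changed: Replaces the per-character accumulator loop (increment per branch, then subtract len(word)) by a closed-form per-line overhead 2 + w.count('\\') + w.count('"') + 2*w.count("'") summed over the lines.
import Mathlib
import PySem

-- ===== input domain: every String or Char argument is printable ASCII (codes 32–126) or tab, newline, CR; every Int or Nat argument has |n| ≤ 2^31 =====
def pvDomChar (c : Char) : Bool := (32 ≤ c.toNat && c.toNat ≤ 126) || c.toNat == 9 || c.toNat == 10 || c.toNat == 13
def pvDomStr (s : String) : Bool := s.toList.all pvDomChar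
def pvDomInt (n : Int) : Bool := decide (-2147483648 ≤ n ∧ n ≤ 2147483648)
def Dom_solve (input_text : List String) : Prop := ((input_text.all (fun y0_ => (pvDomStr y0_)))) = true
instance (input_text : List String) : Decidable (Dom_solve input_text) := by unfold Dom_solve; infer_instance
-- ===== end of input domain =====

-- B replaces A's per-character accumulator loop by a closed-form per-line overhead
-- 2 + count('\') + count('"') + 2*count('\'') summed over the lines (objective: simpler).

-- ===== PORT A =====
-- inner helper 'count(word)': per-character loop, then 'count - len(word) + 2'
def solveCount (word : String) : Int :=
  (word.toList.foldl
    (fun (acc : Int) c =>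
      (if c = '\\' ∨ c = '"' then acc + 1
       else if c = '\'' then acc + 2
       else acc) + 1)
    0) - PySem.Str.len word + 2

def solve (input_text : List String) : Int :=
  (input_text.map solveCount).sum

-- ===== PORT B =====
def solve_alt (input_text : List String) : Int :=
  (input_text.map (fun w =>
    2 + (PySem.Str.count w "\\" : Int) + (PySem.Str.count w "\"" : Int)
      + 2 * (PySem.Str.count w "'" : Int))).sum

-- ===== PRECONDITION & SPEC =====
def Spec_solve (input_text : List String) (out : Int) : Prop := out = solve_alt input_text
instance (input_text : List String) (out : Int) : Decidable (Spec_solve input_text out) := by unfold Spec_solve; infer_instance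

-- ===== CLAIM (what is proved, stated in full; the proofs are below) =====
def Claim_equal_solve : Prop := ∀ (input_text : List String), Dom_solve input_text → Spec_solve input_text (solve input_text)

-- ===== LEMMAS AND PROOFS =====

-- Chars.count with a single-character pattern is List.count (loop-level fact about our B port's primitive use)
theorem count_go_single (a : Char) (cs : List Char) (acc : Nat) :
    PySem.Chars.count.go [a] cs.length cs acc = acc + cs.count a := by
  induction cs generalizing acc with
  | nil => rw [PySem.Chars.count.go.eq_def]; simp
  | cons c cs ih =>
      rw [PySem.Chars.count.go.eq_def]
      by_cases h : c = a
      · simp [h, ih]; omega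
      · have : [a].isPrefixOf (c :: cs) = false := by
          simp [List.isPrefixOf]; exact fun hh => h (by simpa using hh.symm)
        simp [this, ih, h]

theorem chars_count_single (cs : List Char) (a : Char) :
    PySem.Chars.count cs [a] = cs.count a := by
  rw [PySem.Chars.count]
  simpa using count_go_single a cs 0

-- A's per-character fold, with a running accumulator, equals the closed form
theorem foldA (cs : List Char) (acc : Int) :
    cs.foldl
      (fun (acc : Int) c =>
        (if c = '\\' ∨ c = '"' then acc + 1
         else if c = '\'' then acc + 2
         else acc) + 1)
      acc
    = acc + cs.length + cs.count '\\' + cs.count '"' + 2 * cs.count '\'' := by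
  induction cs generalizing acc with
  | nil => simp
  | cons c cs ih =>
      simp only [List.foldl_cons, ih, List.count_cons, List.length_cons]
      by_cases h1 : c = '\\'
      · simp [h1]; ring
      · by_cases h2 : c = '"'
        · simp [h2]; ring
        · by_cases h3 : c = '\''
          · simp [h3]; ring
          · simp [h1, h2, h3]; ring

theorem per_line (w : String) :
    solveCount w
      = 2 + (PySem.Str.count w "\\" : Int) + (PySem.Str.count w "\"" : Int)
          + 2 * (PySem.Str.count w "'" : Int) := by
  simp only [solveCount, PySem.Str.count_eq, PySem.Str.len_eq, foldA]
  have h1 : ("\\").toList = ['\\'] := rfl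
  have h2 : ("\"").toList = ['"'] := rfl
  have h3 : ("'").toList = ['\''] := rfl
  rw [h1, h2, h3, chars_count_single, chars_count_single, chars_count_single]
  ring

-- ===== VERDICT (by name: the statement is the Claim_ definition above) =====
theorem solve_spec : Claim_equal_solve := by
  intro input_text hdom
  clear hdom
  unfold Spec_solve solve solve_alt
  induction input_text with
  | nil => rfl
  | cons w ws ih => simp only [List.map_cons, List.sum_cons, per_line, ih]
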